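-- pv_equiv track=rewrite | github.com/ayanlove81-creator/Tambola | app.py | check_ticket_patterns
-- ===== SOURCE A (Python) =====
-- def check_ticket_patterns(ticket, called_numbers):
--     """Check which patterns are completed on the ticket"""
--     patterns = {
--         'first_line': all(num == 0 or num in called_numbers for num in ticket[0]),
--         'middle_line': all(num == 0 or num in called_numbers for num in ticket[1]),
--         'bottom_line': all(num == 0 or num in called_numbers for num in ticket[2]),
--         'early_five': len([num for row in ticket for num in row if num != 0 and num in called_numbers]) >= 5,
--         'full_house': all(num == 0 or num in called_numbers for row in ticket for num in row)
--     }
--     return patterns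
-- ===== SOURCE B (Python) =====
-- def check_ticket_patterns(ticket, called_numbers):
--     """One pass over the ticket: per-row 'covered' flags plus one hit counter against a set."""
--     called = set(called_numbers)
--     row_ok = []
--     hits = 0
--     for row in ticket:
--         ok = True
--         for num in row:
--             if num != 0:
--                 if num in called:
--                     hits += 1
--                 else:
--                     ok = False
--         row_ok.append(ok)
--     return {
--         'first_line': row_ok[0],
--         'middle_line': row_ok[1],
--         'bottom_line': row_ok[2],
--         'early_five': hits >= 5,
--         'full_house': all(row_ok),
--     }
-- ===== Notes on version B (the rewrite author's own statement) =====
-- stated objective: alternative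
-- what changed: Replaces A's five separate comprehensions (each rescanning the ticket and membership-testing the called list per cell) with a single explicit pass over the ticket that maintains per-row covered flags and one hit counter against a prebuilt set, deriving all five patterns from that state.
import Mathlib
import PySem

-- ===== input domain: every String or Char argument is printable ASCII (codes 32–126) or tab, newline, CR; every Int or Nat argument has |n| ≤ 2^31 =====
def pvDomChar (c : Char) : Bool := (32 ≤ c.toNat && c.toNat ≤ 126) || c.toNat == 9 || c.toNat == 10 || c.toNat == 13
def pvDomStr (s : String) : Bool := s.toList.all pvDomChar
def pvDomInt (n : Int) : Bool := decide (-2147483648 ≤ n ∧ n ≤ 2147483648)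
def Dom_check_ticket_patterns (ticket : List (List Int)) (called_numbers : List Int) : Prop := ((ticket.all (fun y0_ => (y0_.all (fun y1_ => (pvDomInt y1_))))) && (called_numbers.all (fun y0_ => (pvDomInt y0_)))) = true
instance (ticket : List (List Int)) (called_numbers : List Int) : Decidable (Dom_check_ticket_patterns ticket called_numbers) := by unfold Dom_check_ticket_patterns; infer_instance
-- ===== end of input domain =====

-- B replaces A's five separate comprehensions by one pass over the ticket (per-row flags + one
-- hit counter against a prebuilt set); equivalence is proved on tickets with at least 3 rows.

-- ===== PORT A =====
def check_ticket_patterns (ticket : List (List Int)) (called_numbers : List Int) : List (String × Bool) :=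
  [("first_line", (PySem.List.pyGetD ticket 0 []).all (fun num => num == 0 || called_numbers.contains num)),
   ("middle_line", (PySem.List.pyGetD ticket 1 []).all (fun num => num == 0 || called_numbers.contains num)),
   ("bottom_line", (PySem.List.pyGetD ticket 2 []).all (fun num => num == 0 || called_numbers.contains num)),
   ("early_five", decide (((ticket.flatMap (fun row => row.filter (fun num => !(num == 0) && called_numbers.contains num))).length : Int) ≥ 5)),
   ("full_house", ticket.all (fun row => row.all (fun num => num == 0 || called_numbers.contains num)))]

-- ===== PORT B =====
def check_ticket_patterns_alt (ticket : List (List Int)) (called_numbers : List Int) : List (String × Bool) :=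
  let called : PySem.Set Int := PySem.Set.ofList called_numbers
  let st : List Bool × Int :=
    ticket.foldl (fun (acc : List Bool × Int) row =>
      let inner : Bool × Int :=
        row.foldl (fun (p : Bool × Int) num =>
          if num ≠ 0 then
            if PySem.Set.contains called num then (p.1, p.2 + 1) else (false, p.2)
          else p) (true, acc.2)
      (acc.1 ++ [inner.1], inner.2)) ([], 0)
  [("first_line", PySem.List.pyGetD st.1 0 false),
   ("middle_line", PySem.List.pyGetD st.1 1 false),
   ("bottom_line", PySem.List.pyGetD st.1 2 false),
   ("early_five", decide (st.2 ≥ 5)),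
   ("full_house", st.1.all id)]

-- ===== PRECONDITION & SPEC =====
-- Pre_ excludes tickets with fewer than 3 rows: A raises IndexError on ticket[0..2] there (B likewise).
def Pre_check_ticket_patterns (ticket : List (List Int)) (called_numbers : List Int) : Prop :=
  3 ≤ ticket.length
instance (ticket : List (List Int)) (called_numbers : List Int) : Decidable (Pre_check_ticket_patterns ticket called_numbers) := by unfold Pre_check_ticket_patterns; infer_instance

def pvWitness_check_ticket_patterns : List (List Int) × List Int := ([[1, 0], [2], [0]], [1, 2])

def Spec_check_ticket_patterns (ticket : List (List Int)) (called_numbers : List Int) (out : List (String × Bool)) : Prop := out = check_ticket_patterns_alt ticket called_numbers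
instance (ticket : List (List Int)) (called_numbers : List Int) (out : List (String × Bool)) : Decidable (Spec_check_ticket_patterns ticket called_numbers out) := by unfold Spec_check_ticket_patterns; infer_instance

-- ===== CLAIM (what is proved, stated in full; the proofs are below) =====
def Claim_equal_check_ticket_patterns : Prop := ∀ (ticket : List (List Int)) (called_numbers : List Int), Dom_check_ticket_patterns ticket called_numbers → Pre_check_ticket_patterns ticket called_numbers → Spec_check_ticket_patterns ticket called_numbers (check_ticket_patterns ticket called_numbers)

-- ===== LEMMAS AND PROOFS =====

-- Python's `in set(l)` agrees with `in l`.
theorem pv_setContains_eq (l : List Int) (x : Int) :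
    PySem.Set.contains (PySem.Set.ofList l) x = l.contains x := by
  by_cases h : x ∈ l <;> simp [PySem.Set.mem_ofList, h]

-- B's inner fold over one row computes the row flag and adds the row's hit count.
theorem pv_inner (cs : List Int) (row : List Int) : ∀ (b : Bool) (h : Int),
    row.foldl (fun (p : Bool × Int) num =>
      if num ≠ 0 then
        if PySem.Set.contains (PySem.Set.ofList cs) num then (p.1, p.2 + 1) else (false, p.2)
      else p) (b, h)
    = (b && row.all (fun num => num == 0 || cs.contains num),
       h + ((row.filter (fun num => !(num == 0) && cs.contains num)).length : Int)) := by
  induction row with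
  | nil => intro b h; simp
  | cons num rest ih =>
    intro b h
    rw [List.foldl_cons]
    by_cases h0 : num = 0
    · rw [if_neg (not_not_intro h0), ih]
      subst h0; simp
    · rw [if_pos h0, pv_setContains_eq]
      by_cases hc : cs.contains num = true
      · have hm : num ∈ cs := by simpa using hc
        rw [if_pos hc, ih]
        simp [h0, hm]
        omega
      · have hm : num ∉ cs := by simpa using hc
        rw [if_neg hc, ih]
        simp [h0, hm]

-- B's outer fold (with each row's inner fold already summarised) collects all row
-- flags and the total hit count.
theorem pv_outer (cs : List Int) (ticket : List (List Int)) : ∀ (acc : List Bool) (h : Int),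
    ticket.foldl (fun (acc : List Bool × Int) row =>
      (acc.1 ++ [row.all (fun num => num == 0 || cs.contains num)],
       acc.2 + ((row.filter (fun num => !(num == 0) && cs.contains num)).length : Int))) (acc, h)
    = (acc ++ ticket.map (fun row => row.all (fun num => num == 0 || cs.contains num)),
       h + ((ticket.flatMap (fun row => row.filter (fun num => !(num == 0) && cs.contains num))).length : Int)) := by
  induction ticket with
  | nil => intro acc h; simp
  | cons row rest ih =>
    intro acc h
    rw [List.foldl_cons, ih]
    simp [List.flatMap_cons, Prod.ext_iff]
    omega

-- ===== VERDICT (by name: the statement is the Claim_ definition above) =====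
theorem check_ticket_patterns_spec : Claim_equal_check_ticket_patterns := by
  intro ticket called_numbers _ hpre
  unfold Spec_check_ticket_patterns check_ticket_patterns check_ticket_patterns_alt
  dsimp only
  simp only [pv_inner, Bool.true_and]
  rw [pv_outer called_numbers ticket [] 0]
  simp only [List.nil_append, Int.zero_add]
  obtain ⟨r0, r1, r2, rest, rfl⟩ : ∃ r0 r1 r2 rest, ticket = r0 :: r1 :: r2 :: rest := by
    match ticket, hpre with
    | r0 :: r1 :: r2 :: rest, _ => exact ⟨r0, r1, r2, rest, rfl⟩
  rw [PySem.List.pyGetD_eq_getElem _ ([] : List Int) (by norm_num) (by simp only [List.length_cons]; push_cast; omega),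
      PySem.List.pyGetD_eq_getElem _ ([] : List Int) (by norm_num) (by simp only [List.length_cons]; push_cast; omega),
      PySem.List.pyGetD_eq_getElem _ ([] : List Int) (by norm_num) (by simp only [List.length_cons]; push_cast; omega),
      PySem.List.pyGetD_eq_getElem _ false (by norm_num) (by simp only [List.length_map, List.length_cons]; push_cast; omega),
      PySem.List.pyGetD_eq_getElem _ false (by norm_num) (by simp only [List.length_map, List.length_cons]; push_cast; omega),
      PySem.List.pyGetD_eq_getElem _ false (by norm_num) (by simp only [List.length_map, List.length_cons]; push_cast; omega)]
  simp [List.all_map]
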